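-- pv_equiv track=rewrite | github.com/cvcenit/cs11 | Hope_Sets/mockhope1/d.py | remaining
-- ===== SOURCE A (Python) =====
-- def remaining(items, want):
--     if not items:
--         return ()
--     else:
--         if items[0].lower() == want.lower():
--             return remaining(items[1:], want)
--         else:
--             return items[0], *remaining(items[1:], want)
-- ===== SOURCE B (Python) =====
-- def remaining(items, want):
--     w = want.lower()
--     result = []
--     for x in items:
--         if x.lower() != w:
--             result.append(x)
--     return tuple(result)
-- ===== Notes on version B (the rewrite author's own statement) =====
-- stated objective: faster
-- what changed: Replaced the recursion with repeated slice copies (and re-lowering want each call) by a single iterative accumulator loop that lowercases want once.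
import Mathlib
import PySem

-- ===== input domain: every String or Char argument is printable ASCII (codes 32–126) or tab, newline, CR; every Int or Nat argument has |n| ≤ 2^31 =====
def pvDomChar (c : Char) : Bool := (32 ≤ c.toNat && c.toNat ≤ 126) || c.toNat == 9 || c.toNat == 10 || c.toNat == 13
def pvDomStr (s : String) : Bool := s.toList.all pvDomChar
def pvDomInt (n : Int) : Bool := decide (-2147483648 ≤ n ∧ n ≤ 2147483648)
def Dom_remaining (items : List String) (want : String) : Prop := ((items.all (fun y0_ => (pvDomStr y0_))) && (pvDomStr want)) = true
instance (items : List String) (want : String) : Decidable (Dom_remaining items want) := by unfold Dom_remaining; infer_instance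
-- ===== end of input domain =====

-- B replaces A's slice-and-recurse with one iterative accumulator loop (want lowered once); equivalence is about the return value.

-- ===== PORT A =====
def remaining (items : List String) (want : String) : List String :=
  match items with
  | [] => []
  | x :: rest =>
    if PySem.Str.lower x == PySem.Str.lower want then
      remaining rest want
    else
      x :: remaining rest want

-- ===== PORT B =====
def remaining_alt (items : List String) (want : String) : List String :=
  let w := PySem.Str.lower want
  items.foldl (fun acc x => if PySem.Str.lower x ≠ w then acc ++ [x] else acc) []

-- ===== PRECONDITION & SPEC =====
def Spec_remaining (items : List String) (want : String) (out : List String) : Prop := out = remaining_alt items want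
instance (items : List String) (want : String) (out : List String) : Decidable (Spec_remaining items want out) := by unfold Spec_remaining; infer_instance

-- ===== CLAIM (what is proved, stated in full; the proofs are below) =====
def Claim_equal_remaining : Prop := ∀ (items : List String) (want : String), Dom_remaining items want → Spec_remaining items want (remaining items want)

-- ===== LEMMAS AND PROOFS =====
theorem remaining_eq_filter (items : List String) (want : String) :
    remaining items want = items.filter (fun x => PySem.Str.lower x ≠ PySem.Str.lower want) := by
  induction items with
  | nil => rfl
  | cons x rest ih =>
    simp only [remaining, ih, List.filter_cons]
    by_cases h : PySem.Str.lower x = PySem.Str.lower want <;> simp [h]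

theorem remaining_alt_eq_filter (items : List String) (want : String) :
    remaining_alt items want = items.filter (fun x => PySem.Str.lower x ≠ PySem.Str.lower want) := by
  unfold remaining_alt
  simpa using PySem.List.foldl_append_ite_eq_filter
    (l := items) (acc := []) (p := fun x => PySem.Str.lower x ≠ PySem.Str.lower want)

-- ===== VERDICT (by name: the statement is the Claim_ definition above) =====
theorem remaining_spec : Claim_equal_remaining := by
  intro items want _
  unfold Spec_remaining
  rw [remaining_eq_filter, remaining_alt_eq_filter]
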